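-- pv_equiv track=rewrite | github.com/pablisch/katas-in-python | lib/data_reverse.py | data_reverse_basic
-- ===== SOURCE A (Python) =====
-- def data_reverse_basic(data):
--     # Step 1: split the data into chunks of 8 by pushing them into an empty list
--     chunks = []
--     num_of_chunks = int(len(data) / 8)
--     for i in range(num_of_chunks):
--         chunks.append(data[i*8:(i+1)*8])
--
--     # Step 2: reverse the order of the chunks
--     # NOTE: this could also have been done by modifying the chunks list: chunks.reverse()
--     reversed_chunks = list(reversed(chunks))
--
--     # Step 3: flatten the nested sublists. This syntax is a little tricky still.
--     # The outer loop is 'for sublist in reversed_chunks' and iterates over each sublist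
--     # The inner loop is 'for item in sublist' which iterates over each item in each sublist as the outer loop iterates over that sublist in turn.
--     # The beginning 'item' is each item from each sublist as it is put into the new list.
--     # Alternatives are using a itertools, sum or more expressive loops.
--     reversed_data = [item for sublist in reversed_chunks for item in sublist]
--     return reversed_data
-- ===== SOURCE B (Python) =====
-- def data_reverse_basic(data):
--     # Closed-form permutation: output position i takes its element directly from
--     # source index n - 8 - (i - i % 8) + i % 8 (block order reversed, order inside
--     # a block kept); one gather pass, no chunk list, no reverse, no flatten.
--     n = len(data) - len(data) % 8
--     return [data[n - 8 - (i - i % 8) + i % 8] for i in range(n)]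
-- ===== Notes on version B (the rewrite author's own statement) =====
-- stated objective: alternative
-- what changed: Replaces A's three-stage pipeline (build a list of 8-element chunks, reverse the chunk list, flatten it) with a closed-form index permutation: a single gather pass that computes each output element's source index arithmetically (n - 8 - (i - i%8) + i%8), materializing no intermediate structure.
import Mathlib
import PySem

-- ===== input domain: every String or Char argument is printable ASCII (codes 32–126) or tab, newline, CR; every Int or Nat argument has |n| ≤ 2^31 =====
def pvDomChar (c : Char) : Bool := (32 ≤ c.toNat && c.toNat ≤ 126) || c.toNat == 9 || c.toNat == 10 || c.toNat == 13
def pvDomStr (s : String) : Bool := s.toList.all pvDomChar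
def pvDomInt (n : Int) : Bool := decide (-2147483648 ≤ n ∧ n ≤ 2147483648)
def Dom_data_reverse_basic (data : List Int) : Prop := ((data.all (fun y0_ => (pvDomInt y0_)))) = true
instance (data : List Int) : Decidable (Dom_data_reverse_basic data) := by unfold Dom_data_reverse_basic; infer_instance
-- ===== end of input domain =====

-- B replaces A's chunk-list/reverse/flatten pipeline with a closed-form index permutation (one gather pass); same O(n) cost, no intermediate structure.

-- ===== PORT A =====
def data_reverse_basic (data : List Int) : List Int :=
  -- num_of_chunks = int(len(data) / 8)
  let numOfChunks : Int := PySem.Int.truncdiv (data.length : Int) 8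
  -- chunks.append(data[i*8:(i+1)*8]) for i in range(num_of_chunks)
  let chunks : List (List Int) :=
    (PySem.List.pyRange 0 numOfChunks 1).foldl
      (fun acc i => acc ++ [PySem.List.slice data (some (i * 8)) (some ((i + 1) * 8))]) []
  -- reversed_chunks = list(reversed(chunks))
  let reversedChunks : List (List Int) := chunks.reverse
  -- [item for sublist in reversed_chunks for item in sublist]
  reversedChunks.foldl (fun acc sublist => acc ++ sublist) []

-- ===== PORT B =====
def data_reverse_basic_alt (data : List Int) : List Int :=
  -- n = len(data) - len(data) % 8
  let n : Int := (data.length : Int) - PySem.Int.mod (data.length : Int) 8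
  -- [data[n - 8 - (i - i % 8) + i % 8] for i in range(n)]
  -- the computed index is always in range (proved below), so the getD default is never used
  (PySem.List.pyRange 0 n 1).map (fun i =>
    (PySem.List.pyGet? data (n - 8 - (i - PySem.Int.mod i 8) + PySem.Int.mod i 8)).getD 0)

-- ===== PRECONDITION & SPEC =====
def Spec_data_reverse_basic (data : List Int) (out : List Int) : Prop := out = data_reverse_basic_alt data
instance (data : List Int) (out : List Int) : Decidable (Spec_data_reverse_basic data out) := by unfold Spec_data_reverse_basic; infer_instance

-- ===== CLAIM (what is proved, stated in full; the proofs are below) =====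
def Claim_equal_data_reverse_basic : Prop := ∀ (data : List Int), Dom_data_reverse_basic data → Spec_data_reverse_basic data (data_reverse_basic data)

-- ===== LEMMAS AND PROOFS =====

-- the common shape: chunks taken back to front, each chunk kept in order
def revChunks (data : List Int) : Nat → List Int
  | 0 => []
  | k + 1 => (data.drop (8 * k)).take 8 ++ revChunks data k

lemma foldl_append_flatten (l : List (List Int)) :
    l.foldl (fun a b => a ++ b) [] = l.flatten := by
  induction l using List.reverseRecOn with
  | nil => rfl
  | append_singleton xs x ih => simp [ih]

lemma a_flat (data : List Int) (k : Nat) :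
    (((List.range k).map
        (fun j : Nat => PySem.List.slice data (some ((j : Int) * 8)) (some (((j : Int) + 1) * 8)))).reverse).flatten
      = revChunks data k := by
  induction k with
  | zero => rfl
  | succ k ih =>
    rw [List.range_succ, List.map_append, List.reverse_append, List.flatten_append]
    simp only [List.map_cons, List.map_nil, List.reverse_cons, List.reverse_nil,
      List.nil_append, List.flatten_cons, List.flatten_nil, List.append_nil, ih]
    rw [revChunks]
    congr 1
    have h1 : ((k : Int)) * 8 = ((8 * k : Nat) : Int) := by push_cast; ring
    have h2 : ((k : Int) + 1) * 8 = ((8 * k : Nat) : Int) + ((8 : Nat) : Int) := by push_cast; ring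
    rw [h1, h2, PySem.List.slice_natCast_add]

lemma a_eq (data : List Int) :
    data_reverse_basic data = revChunks data (data.length / 8) := by
  have ht : PySem.Int.truncdiv (data.length : Int) 8 = ((data.length / 8 : Nat) : Int) := by
    simp [PySem.Int.truncdiv, Int.tdiv_eq_ediv]
  unfold data_reverse_basic
  simp only [ht, PySem.List.pyRange_zero_natCast,
    PySem.List.foldl_append_singleton_eq_map, foldl_append_flatten, List.map_map,
    List.nil_append, Function.comp_def]
  exact a_flat data (data.length / 8)

-- the 8 elements starting at position a, read through pyGet?, are the slice (drop a).take 8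
lemma chunk_gather (data : List Int) (a : Nat) (ha : a + 8 ≤ data.length) :
    (List.range 8).map (fun r : Nat => ((data[a + r]?).getD 0)) = (data.drop a).take 8 := by
  apply List.ext_getElem
  · simp; omega
  · intro i hi hi'
    simp only [List.getElem_map, List.getElem_range, List.getElem_take, List.getElem_drop]
    have : a + i < data.length := by simp at hi; omega
    rw [List.getElem?_eq_getElem this]
    rfl

-- the gather over range (8*k) with the closed-form index equals the chunk recursion
lemma b_gather (data : List Int) (k : Nat) (hk : 8 * k ≤ data.length) :
    (List.range (8 * k)).map
        (fun j : Nat => ((data[8 * (k - 1 - j / 8) + j % 8]?).getD 0))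
      = revChunks data k := by
  induction k with
  | zero => rfl
  | succ k ih =>
    have h8 : 8 * (k + 1) = 8 + 8 * k := by ring
    rw [h8, List.range_add, List.map_append, List.map_map, revChunks]
    congr 1
    · -- first output block is the last input chunk
      rw [← chunk_gather data (8 * k) (by omega)]
      apply List.map_congr_left
      intro j hj
      rw [List.mem_range] at hj
      congr 2
      omega
    · -- remaining blocks: shift by 8 and use the IH
      rw [← ih (by omega)]
      apply List.map_congr_left
      intro j hj
      rw [List.mem_range] at hj
      simp only [Function.comp_apply]
      congr 2
      omega

lemma b_eq (data : List Int) :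
    data_reverse_basic_alt data = revChunks data (data.length / 8) := by
  have hm : PySem.Int.mod (data.length : Int) 8 = ((data.length % 8 : Nat) : Int) :=
    PySem.Int.mod_natCast data.length 8
  have hn : (data.length : Int) - ((data.length % 8 : Nat) : Int)
      = ((8 * (data.length / 8) : Nat) : Int) := by
    push_cast; omega
  unfold data_reverse_basic_alt
  simp only [hm, hn, PySem.List.pyRange_zero_natCast, List.map_map, Function.comp_def]
  rw [← b_gather data (data.length / 8) (by omega)]
  apply List.map_congr_left
  intro j hj
  rw [List.mem_range] at hj
  have hjm : PySem.Int.mod (j : Int) 8 = ((j % 8 : Nat) : Int) := PySem.Int.mod_natCast j 8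
  have hidx : ((8 * (data.length / 8) : Nat) : Int) - 8 - ((j : Int) - ((j % 8 : Nat) : Int))
      + ((j % 8 : Nat) : Int) = ((8 * (data.length / 8 - 1 - j / 8) + j % 8 : Nat) : Int) := by
    push_cast; omega
  rw [hjm, hidx, PySem.List.pyGet?_natCast]

-- ===== VERDICT (by name: the statement is the Claim_ definition above) =====
theorem data_reverse_basic_spec : Claim_equal_data_reverse_basic := by
  intro data _
  unfold Spec_data_reverse_basic
  rw [a_eq, b_eq]
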